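-- pv_equiv track=rewrite | github.com/charlysl/MIT-6.009-Python-Self-Learning | quizes/q1_practice_solution.py | all_phrases
-- ===== SOURCE A (Python) =====
-- def all_phrases(grammar, root):
--     """ Using production rules from grammar expand root into
--         all legal phrases. """
--
--     # recursively generate expansion of phrase, stopping when there
--     # are no more nonterminals
--     def expand(phrase):
--         # look for first nonterminal then expand it
--         for i,s in enumerate(phrase):
--             # is s a non-terminal?
--             if s in grammar:
--                 # replace nonterminal with each of its productions
--                 for production in grammar[s]:
--                     expansion = phrase[:i] + production + phrase[i+1:]
--                     # then expand the updated phrase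
--                     yield from expand(expansion)
--                 return
--
--         # no nonterminals: its legal!
--         yield phrase
--
--     # materialize result of generator
--     return list(expand([root]))
-- ===== SOURCE B (Python) =====
-- def all_phrases(grammar, root):
--     """ Using production rules from grammar expand root into
--         all legal phrases. """
--     # iterative DFS with an explicit worklist instead of recursion
--     stack = [[root]]
--     results = []
--     while stack:
--         phrase = stack.pop()
--         # find the first nonterminal in the phrase, if any
--         for i, s in enumerate(phrase):
--             if s in grammar:
--                 break
--         else:
--             # no nonterminal: the phrase is legal
--             results.append(phrase)
--             continue
--         # push expansions in reverse so the first production is expanded first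
--         for production in reversed(grammar[s]):
--             stack.append(phrase[:i] + production + phrase[i+1:])
--     return results
-- ===== Notes on version B (the rewrite author's own statement) =====
-- stated objective: alternative
-- what changed: Replaces A's recursive generator (yield from on the leftmost-nonterminal expansion) by an explicit iterative worklist: a stack of phrases popped in a loop, with expansions pushed in reverse so the DFS pre-order of results is preserved.
import Mathlib
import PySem

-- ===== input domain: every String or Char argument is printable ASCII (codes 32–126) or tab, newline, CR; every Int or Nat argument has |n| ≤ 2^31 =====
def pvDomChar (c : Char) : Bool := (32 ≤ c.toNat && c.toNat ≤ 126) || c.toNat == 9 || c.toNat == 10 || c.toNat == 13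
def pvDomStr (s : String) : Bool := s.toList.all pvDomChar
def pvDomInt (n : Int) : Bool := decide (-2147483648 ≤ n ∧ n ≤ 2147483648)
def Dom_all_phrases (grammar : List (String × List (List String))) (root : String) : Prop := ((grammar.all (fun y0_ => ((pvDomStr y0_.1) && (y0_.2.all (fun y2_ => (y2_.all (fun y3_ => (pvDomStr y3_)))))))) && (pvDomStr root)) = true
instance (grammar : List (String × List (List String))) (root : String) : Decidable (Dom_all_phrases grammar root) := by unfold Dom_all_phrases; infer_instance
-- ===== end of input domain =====

-- B replaces A's recursive generator by an explicit iterative worklist (stack) DFS; objective: alternative decomposition, same result order.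

-- first-match lookup in the grammar ('s in grammar' / 'grammar[s]' of the Python dict, assoc-list convention)
def pvLookup (g : List (String × List (List String))) (s : String) : Option (List (List String)) :=
  (g.find? (fun kv => kv.1 == s)).map (·.2)

-- 'for i,s in enumerate(phrase): if s in grammar: …' — index of the first nonterminal, with the symbol
def pvFindNT (g : List (String × List (List String))) : List String → Nat → Option (Nat × String)
  | [], _ => none
  | s :: rest, i => if (pvLookup g s).isSome then some (i, s) else pvFindNT g rest (i + 1)

def pvB (g : List (String × List (List String))) : Nat :=
  1 + (g.flatMap (fun kv => kv.2.map List.length)).foldl max 0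

-- ===== PORT A =====
-- literal port of A's recursive generator 'expand'; the Nat argument is fuel (totality only: on
-- grammars admitted by Pre_ the initial fuel pvB^|grammar|+1 is proved sufficient, so it never runs out)
def pvExpandA (g : List (String × List (List String))) : Nat → List String → List (List String)
  | 0, _ => []
  | fuel + 1, phrase =>
    match pvFindNT g phrase 0 with
    | some (i, s) =>
      ((pvLookup g s).getD []).flatMap (fun production =>
        pvExpandA g fuel (phrase.take i ++ production ++ phrase.drop (i + 1)))
    | none => [phrase]

def all_phrases (grammar : List (String × List (List String))) (root : String) : List (List String) :=
  pvExpandA grammar ((pvB grammar) ^ grammar.length + 1) [root]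

-- ===== PORT B =====
def pvC (g : List (String × List (List String))) : Nat :=
  1 + (g.map (fun kv => kv.2.length)).foldl max 0

-- the while loop of B: pop a phrase, either record it or push its expansions (reversed) back
def pvLoopB (g : List (String × List (List String))) : Nat → List (List String) → List (List String) → List (List String)
  | _, [], results => results
  | 0, _ :: _, results => results   -- fuel exhausted (never happens under Pre_)
  | fuel + 1, phrase :: stack, results =>
    match pvFindNT g phrase 0 with
    | none => pvLoopB g fuel stack (results ++ [phrase])
    | some (i, s) =>
      pvLoopB g fuel
        ((((pvLookup g s).getD []).map (fun production =>
            phrase.take i ++ production ++ phrase.drop (i + 1))).reverse.foldl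
          (fun st e => e :: st) stack)
        results

def all_phrases_alt (grammar : List (String × List (List String))) (root : String) : List (List String) :=
  pvLoopB grammar ((pvC grammar) ^ ((pvB grammar) ^ grammar.length) + 1) [[root]] []

-- ===== PRECONDITION & SPEC =====
-- pvOrd g root l: l lists (some of) g's first-match entries in a top-down order such that
--   (a) every entry of l is the entry 'grammar[key]' actually returns,
--   (b) every symbol t in a production of the i-th entry is either a non-key or a key of l
--       listed strictly AFTER position i (so the key-dependency relation on l is acyclic),
--   (c) if root is a key, its entry is in l.
-- Such an l exists exactly when the nonterminals reachable from root form an acyclic graph,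
-- i.e. exactly when A's recursion terminates.
def pvOrd (g : List (String × List (List String))) (root : String)
    (l : List (String × List (List String))) : Prop :=
  (∀ kv ∈ l, pvLookup g kv.1 = some kv.2) ∧
  (∀ (i : Fin l.length), ∀ p ∈ l[i].2, ∀ t ∈ p,
      (pvLookup g t = none ∨ t ∈ l.map Prod.fst) ∧ t ∉ (l.take (i + 1)).map Prod.fst) ∧
  ((pvLookup g root).isSome → root ∈ l.map Prod.fst)

-- Pre_ excludes exactly the grammars on which A never returns: if the nonterminals reachable
-- from root contain a cycle, A's recursion is infinite (Python raises RecursionError), and it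
-- requires precisely a topological ordering of the root-reachable entries; grammars whose
-- cycles are unreachable from root still satisfy Pre_ (take l = the reachable entries).
-- structural enumeration of permutations (List.permutations is well-founded and does not
-- reduce under 'decide'): all insertions of x into l, and all reorderings of l
def pvIns (x : String × List (List String)) :
    List (String × List (List String)) → List (List (String × List (List String)))
  | [] => [[x]]
  | y :: ys => (x :: y :: ys) :: (pvIns x ys).map (fun r => y :: r)

def pvPerms : List (String × List (List String)) → List (List (String × List (List String)))
  | [] => [[]]
  | x :: xs => (pvPerms xs).flatMap (pvIns x)

def Pre_all_phrases (grammar : List (String × List (List String))) (root : String) : Prop :=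
  ∃ l ∈ grammar.sublists.flatMap pvPerms, pvOrd grammar root l

instance (grammar : List (String × List (List String))) (root : String) : Decidable (Pre_all_phrases grammar root) := by
  unfold Pre_all_phrases pvOrd; infer_instance

def pvWitness_all_phrases : (List (String × List (List String))) × String :=
  ([("S", [["a"], ["T", "b"]]), ("T", [["c"]])], "S")

def Spec_all_phrases (grammar : List (String × List (List String))) (root : String) (out : List (List String)) : Prop := out = all_phrases_alt grammar root
instance (grammar : List (String × List (List String))) (root : String) (out : List (List String)) : Decidable (Spec_all_phrases grammar root out) := by unfold Spec_all_phrases; infer_instance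

-- ===== CLAIM (what is proved, stated in full; the proofs are below) =====
def Claim_equal_all_phrases : Prop := ∀ (grammar : List (String × List (List String))) (root : String), Dom_all_phrases grammar root → Pre_all_phrases grammar root → Spec_all_phrases grammar root (all_phrases grammar root)

-- ===== LEMMAS AND PROOFS =====

theorem pvIns_length (x : String × List (List String)) :
    ∀ (l r : List (String × List (List String))), r ∈ pvIns x l → r.length = l.length + 1 := by
  intro l
  induction l with
  | nil => intro r hr; simp [pvIns] at hr; simp [hr]
  | cons y ys ih =>
    intro r hr
    simp only [pvIns, List.mem_cons, List.mem_map] at hr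
    rcases hr with rfl | ⟨r', hr', rfl⟩
    · simp
    · simp [ih r' hr']

theorem pvPerms_length :
    ∀ (a l : List (String × List (List String))), l ∈ pvPerms a → l.length = a.length := by
  intro a
  induction a with
  | nil => intro l hl; simp [pvPerms] at hl; simp [hl]
  | cons x xs ih =>
    intro l hl
    simp only [pvPerms, List.mem_flatMap] at hl
    rcases hl with ⟨m, hm, hlm⟩
    have := pvIns_length x m l hlm
    simp [this, ih m hm]

-- position of a symbol among the keys of an ordering l (l.length if it is not a key)
def pvIdx (l : List (String × List (List String))) (s : String) : Nat := (l.map Prod.fst).idxOf s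

-- rank of a symbol w.r.t. l: earlier keys have larger rank, non-keys of l rank 0
def pvRank (l : List (String × List (List String))) (s : String) : Nat := l.length - pvIdx l s

-- a symbol is good if it is a terminal or a key of l
def pvGoodS (g l : List (String × List (List String))) (t : String) : Prop :=
  pvLookup g t = none ∨ t ∈ l.map Prod.fst

def pvGoodP (g l : List (String × List (List String))) (phrase : List String) : Prop :=
  ∀ t ∈ phrase, pvGoodS g l t

-- measure of a phrase; strictly decreases at each expansion (for good phrases)
def pvPhi (l g : List (String × List (List String))) (phrase : List String) : Nat :=
  (phrase.map (fun t => (pvB g) ^ (pvRank l t))).sum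

-- canonical result of A's expansion with just-sufficient fuel
def pvE (l g : List (String × List (List String))) (phrase : List String) : List (List String) :=
  pvExpandA g (pvPhi l g phrase + 1) phrase

def pvPsi (l g : List (String × List (List String))) (stack : List (List String)) : Nat :=
  (stack.map (fun ph => (pvC g) ^ (pvPhi l g ph))).sum

theorem pv_foldl_max_le_init (l : List Nat) (a : Nat) : a ≤ l.foldl max a := by
  induction l generalizing a with
  | nil => simp
  | cons y ys ih => exact le_trans (le_max_left a y) (ih (max a y))

theorem pv_le_foldl_max (l : List Nat) (a x : Nat) (h : x ∈ l) : x ≤ l.foldl max a := by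
  induction l generalizing a with
  | nil => cases h
  | cons y ys ih =>
    rcases List.mem_cons.mp h with rfl | h
    · exact le_trans (le_max_right a x) (pv_foldl_max_le_init ys _)
    · exact ih _ h

theorem pv_foldl_cons_eq (l acc : List (List String)) :
    l.foldl (fun st e => e :: st) acc = l.reverse ++ acc := by
  induction l generalizing acc with
  | nil => simp
  | cons x xs ih => simp [List.foldl_cons, ih, List.reverse_cons]

theorem pvPhi_append (l g : List (String × List (List String))) (u v : List String) :
    pvPhi l g (u ++ v) = pvPhi l g u + pvPhi l g v := by
  simp [pvPhi]

theorem pvPsi_append (l g : List (String × List (List String))) (u v : List (List String)) :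
    pvPsi l g (u ++ v) = pvPsi l g u + pvPsi l g v := by
  simp [pvPsi]

theorem pvLookup_mem (g : List (String × List (List String))) (s : String) (ps : List (List String))
    (h : pvLookup g s = some ps) : (s, ps) ∈ g := by
  unfold pvLookup at h
  rcases Option.map_eq_some_iff.mp h with ⟨kv, hfind, hsnd⟩
  have hmem := List.mem_of_find?_eq_some hfind
  have hpred := List.find?_some hfind
  have h1 : kv.1 = s := by simpa using hpred
  have : kv = (s, ps) := by
    cases kv; simp_all
  rwa [this] at hmem

theorem pv_idxOf_le (l : List String) (x : String) :
    ∀ (j : Nat) (hj : j < l.length), l[j] = x → l.idxOf x ≤ j := by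
  induction l with
  | nil => intro j hj _; simp at hj
  | cons a l' ih =>
    intro j hj hx
    cases j with
    | zero =>
      simp at hx
      simp [hx]
    | succ m =>
      by_cases ha : a = x
      · simp [ha]
      · have := ih m (by simpa using hj) (by simpa using hx)
        rw [List.idxOf_cons]
        simp [beq_eq_false_iff_ne.mpr ha]
        omega

theorem pv_take_le_idxOf (l : List String) (t : String) :
    ∀ n, t ∈ l → t ∉ l.take n → n ≤ l.idxOf t := by
  induction l with
  | nil => intro n hm _; cases hm
  | cons a l' ih =>
    intro n hm hnt
    cases n with
    | zero => omega
    | succ m =>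
      have hne : t ≠ a := by
        intro rfl'; exact hnt (by simp [rfl'])
      have hm' : t ∈ l' := by
        rcases List.mem_cons.mp hm with rfl | hm'
        · exact absurd rfl hne
        · exact hm'
      have hnt' : t ∉ l'.take m := fun hx => hnt (by simp; right; exact hx)
      have := ih m hm' hnt'
      rw [List.idxOf_cons]
      simp [Ne.symm hne |> beq_eq_false_iff_ne.mpr]
      omega

theorem pvIdx_not_key (l : List (String × List (List String))) (t : String)
    (h : t ∉ l.map Prod.fst) : pvIdx l t = l.length := by
  unfold pvIdx
  rw [List.idxOf_eq_length_iff.mpr h, List.length_map]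

-- the entry of a good key s agrees with the grammar's first-match lookup
theorem pvEntry_mem (g : List (String × List (List String))) (root : String)
    (l : List (String × List (List String))) (hord : pvOrd g root l)
    (s : String) (ps : List (List String)) (hsl : s ∈ l.map Prod.fst)
    (hlk : pvLookup g s = some ps) : (s, ps) ∈ l := by
  rcases List.mem_map.mp hsl with ⟨kv, hkv, hfst⟩
  have h1 := hord.1 kv hkv
  rw [hfst, hlk] at h1
  have : kv = (s, ps) := by cases kv; simp_all
  rwa [this] at hkv

-- facts at one expansion step: the expanded key has positive rank, and every symbol of every
-- production is good with strictly smaller rank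
theorem pvStepFacts (g : List (String × List (List String))) (root : String)
    (l : List (String × List (List String))) (hord : pvOrd g root l)
    (s : String) (ps : List (List String)) (hsl : s ∈ l.map Prod.fst)
    (hlk : pvLookup g s = some ps) :
    1 ≤ pvRank l s ∧ ∀ p ∈ ps, ∀ t ∈ p, pvGoodS g l t ∧ pvRank l t < pvRank l s := by
  have hmem : (s, ps) ∈ l := pvEntry_mem g root l hord s ps hsl hlk
  rcases List.mem_iff_getElem.mp hmem with ⟨j, hj, hgj⟩
  have hjs : (l.map Prod.fst)[j]'(by simpa using hj) = s := by simp [hgj]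
  have hidx : pvIdx l s ≤ j := pv_idxOf_le (l.map Prod.fst) s j (by simpa using hj) hjs
  have hrs : 1 ≤ pvRank l s := by unfold pvRank; omega
  refine ⟨hrs, fun p hp t ht => ?_⟩
  have hcl := hord.2.1 ⟨j, hj⟩ p (by show p ∈ (l[j]).2; rw [hgj]; exact hp) t ht
  rcases hcl with ⟨hgoodt, hnt⟩
  refine ⟨hgoodt, ?_⟩
  rw [List.map_take] at hnt
  by_cases hkey : t ∈ l.map Prod.fst
  · have h1 := pv_take_le_idxOf (l.map Prod.fst) t (j + 1) hkey hnt
    simp only [pvRank, pvIdx] at hidx ⊢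
    omega
  · have h0 := pvIdx_not_key l t hkey
    simp only [pvRank, pvIdx] at h0 hidx ⊢
    omega

theorem pvProdLen (g : List (String × List (List String))) (s : String) (ps : List (List String))
    (p : List String) (h : pvLookup g s = some ps) (hp : p ∈ ps) : p.length < pvB g := by
  have hmem := pvLookup_mem g s ps h
  have : p.length ∈ (g.flatMap (fun kv => kv.2.map List.length)) := by
    simp only [List.mem_flatMap]
    exact ⟨(s, ps), hmem, by simp; exact ⟨p, hp, rfl⟩⟩
  have := pv_le_foldl_max _ 0 _ this
  unfold pvB; omega

theorem pvProdCount (g : List (String × List (List String))) (s : String) (ps : List (List String))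
    (h : pvLookup g s = some ps) : ps.length < pvC g := by
  have hmem := pvLookup_mem g s ps h
  have : ps.length ∈ (g.map (fun kv => kv.2.length)) := by
    simp only [List.mem_map]
    exact ⟨(s, ps), hmem, rfl⟩
  have := pv_le_foldl_max _ 0 _ this
  unfold pvC; omega

-- characterization of pvFindNT: position and symbol
theorem pvFindNT_some (g : List (String × List (List String))) :
    ∀ (phrase : List String) (j i : Nat) (s : String),
    pvFindNT g phrase j = some (i, s) →
    ∃ k, i = j + k ∧ phrase[k]? = some s ∧ (pvLookup g s).isSome := by
  intro phrase
  induction phrase with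
  | nil => intro j i s h; simp [pvFindNT] at h
  | cons x xs ih =>
    intro j i s h
    by_cases hx : (pvLookup g x).isSome
    · rw [pvFindNT, if_pos hx] at h
      have h2 := Option.some.inj h
      injection h2 with h3 h4
      subst h3; subst h4
      exact ⟨0, by omega, by simp, hx⟩
    · simp [pvFindNT, hx] at h
      rcases ih (j + 1) i s h with ⟨k, hk, hget, hsome⟩
      exact ⟨k + 1, by omega, by simpa using hget, hsome⟩

-- a good phrase with first nonterminal s: s is a key of l
theorem pvNT_key (g l : List (String × List (List String))) (phrase : List String)
    (i : Nat) (s : String) (hgood : pvGoodP g l phrase)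
    (hfind : pvFindNT g phrase 0 = some (i, s)) : s ∈ l.map Prod.fst := by
  rcases pvFindNT_some g phrase 0 i s hfind with ⟨k, _, hget, hsome⟩
  have hs : s ∈ phrase := List.mem_of_getElem? hget
  rcases hgood s hs with hnone | hmem
  · rw [hnone] at hsome; simp at hsome
  · exact hmem

-- goodness of the expanded phrase
theorem pvGood_new (g l : List (String × List (List String))) (phrase p : List String) (i : Nat)
    (hgood : pvGoodP g l phrase) (hp : ∀ t ∈ p, pvGoodS g l t) :
    pvGoodP g l (phrase.take i ++ p ++ phrase.drop (i + 1)) := by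
  intro t ht
  rcases List.mem_append.mp ht with ht' | hd
  · rcases List.mem_append.mp ht' with htk | htp
    · exact hgood t (List.mem_of_mem_take htk)
    · exact hp t htp
  · exact hgood t (List.mem_of_mem_drop hd)

-- the Φ-decrease at an expansion step
theorem pvPhi_dec (l g : List (String × List (List String)))
    (phrase : List String) (i : Nat) (s : String) (ps : List (List String)) (p : List String)
    (hfind : pvFindNT g phrase 0 = some (i, s))
    (hlk : pvLookup g s = some ps) (hp : p ∈ ps)
    (hdec : ∀ t ∈ p, pvRank l t < pvRank l s) (hHs : 1 ≤ pvRank l s) :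
    pvPhi l g (phrase.take i ++ p ++ phrase.drop (i + 1)) < pvPhi l g phrase := by
  rcases pvFindNT_some g phrase 0 i s hfind with ⟨k, hk, hget, _⟩
  have hik : i = k := by omega
  subst hik
  have hilt : i < phrase.length := by
    rcases Nat.lt_or_ge i phrase.length with h | h
    · exact h
    · simp [List.getElem?_eq_none h] at hget
  have hgeti : phrase[i] = s := by
    rw [List.getElem?_eq_getElem hilt] at hget
    exact Option.some.inj hget
  have hdecomp : phrase = phrase.take i ++ s :: phrase.drop (i + 1) := by
    conv_lhs => rw [← List.take_append_drop i phrase]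
    rw [List.drop_eq_getElem_cons hilt, hgeti]
  have hB : 1 ≤ pvB g := by unfold pvB; omega
  have hφp : pvPhi l g p < (pvB g) ^ (pvRank l s) := by
    have hbound : ∀ x ∈ p.map (fun t => (pvB g) ^ (pvRank l t)), x ≤ (pvB g) ^ (pvRank l s - 1) := by
      intro x hx
      rcases List.mem_map.mp hx with ⟨t, ht, rfl⟩
      exact Nat.pow_le_pow_right hB (by have := hdec t ht; omega)
    have hsum : pvPhi l g p ≤ p.length * (pvB g) ^ (pvRank l s - 1) := by
      have := List.sum_le_card_nsmul _ _ hbound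
      simpa [pvPhi, smul_eq_mul] using this
    have hlen : p.length < pvB g := pvProdLen g s ps p hlk hp
    have hpos : 0 < (pvB g) ^ (pvRank l s - 1) := Nat.pow_pos (by omega)
    calc pvPhi l g p ≤ p.length * (pvB g) ^ (pvRank l s - 1) := hsum
      _ < pvB g * (pvB g) ^ (pvRank l s - 1) := by exact Nat.mul_lt_mul_of_lt_of_le hlen (le_refl _) hpos
      _ = (pvB g) ^ (pvRank l s - 1 + 1) := by rw [pow_succ]; ring
      _ = (pvB g) ^ (pvRank l s) := by congr 1; omega
  calc pvPhi l g (phrase.take i ++ p ++ phrase.drop (i + 1))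
      = pvPhi l g (phrase.take i) + pvPhi l g p + pvPhi l g (phrase.drop (i + 1)) := by
        rw [pvPhi_append, pvPhi_append]
    _ < pvPhi l g (phrase.take i) + (pvB g) ^ (pvRank l s) + pvPhi l g (phrase.drop (i + 1)) := by omega
    _ = pvPhi l g (phrase.take i ++ s :: phrase.drop (i + 1)) := by
        rw [pvPhi_append]; simp [pvPhi]; ring
    _ = pvPhi l g phrase := by rw [← hdecomp]

-- a phrase containing a nonterminal has positive measure
theorem pvPhi_pos (l g : List (String × List (List String))) (phrase : List String)
    (i : Nat) (s : String) (hfind : pvFindNT g phrase 0 = some (i, s)) :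
    1 ≤ pvPhi l g phrase := by
  rcases pvFindNT_some g phrase 0 i s hfind with ⟨k, _, hget, _⟩
  have hs : s ∈ phrase := List.mem_of_getElem? hget
  have hmem : (pvB g) ^ (pvRank l s) ∈ phrase.map (fun t => (pvB g) ^ (pvRank l t)) :=
    List.mem_map.mpr ⟨s, hs, rfl⟩
  have h1 : 1 ≤ (pvB g) ^ (pvRank l s) := Nat.pow_pos (by unfold pvB; omega)
  have h2 := List.single_le_sum (fun (x : Nat) _ => Nat.zero_le x) _ hmem
  unfold pvPhi
  omega

-- fuel-irrelevance of A's expansion above the measure, for good phrases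
theorem pvExpandA_fuel (g : List (String × List (List String))) (root : String)
    (l : List (String × List (List String))) (hord : pvOrd g root l) :
    ∀ (f1 : Nat) (phrase : List String) (f2 : Nat),
      pvGoodP g l phrase →
      pvPhi l g phrase < f1 → pvPhi l g phrase < f2 →
      pvExpandA g f1 phrase = pvExpandA g f2 phrase := by
  intro f1
  induction f1 with
  | zero => intro phrase f2 _ h1 _; omega
  | succ a ih =>
    intro phrase f2 hgood h1 h2
    cases f2 with
    | zero => omega
    | succ b =>
      simp only [pvExpandA]
      cases hfind : pvFindNT g phrase 0 with
      | none => rfl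
      | some is =>
        obtain ⟨i, s⟩ := is
        cases hlk : pvLookup g s with
        | none =>
          rcases pvFindNT_some g phrase 0 i s hfind with ⟨_, _, _, hsome⟩
          rw [hlk] at hsome; simp at hsome
        | some ps =>
          have hsl : s ∈ l.map Prod.fst := pvNT_key g l phrase i s hgood hfind
          rcases pvStepFacts g root l hord s ps hsl hlk with ⟨hrs, hfacts⟩
          simp only [hlk, Option.getD_some, List.flatMap_def]
          congr 1
          apply List.map_congr_left
          intro p hp
          have hdec : ∀ t ∈ p, pvRank l t < pvRank l s := fun t ht => (hfacts p hp t ht).2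
          have hgd : pvGoodP g l (phrase.take i ++ p ++ phrase.drop (i + 1)) :=
            pvGood_new g l phrase p i hgood (fun t ht => (hfacts p hp t ht).1)
          have hφ := pvPhi_dec l g phrase i s ps p hfind hlk hp hdec hrs
          exact ih _ b hgd (by omega) (by omega)

theorem pvLoopB_spec (g : List (String × List (List String))) (root : String)
    (l : List (String × List (List String))) (hord : pvOrd g root l) :
    ∀ (fuel : Nat) (stack results : List (List String)),
      (∀ ph ∈ stack, pvGoodP g l ph) →
      pvPsi l g stack < fuel →
      pvLoopB g fuel stack results = results ++ stack.flatMap (fun ph => pvE l g ph) := by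
  intro fuel
  induction fuel with
  | zero => intro stack results _ h; omega
  | succ f ih =>
    intro stack results hgoods h
    cases stack with
    | nil => simp [pvLoopB]
    | cons phrase stack =>
      have hgood : pvGoodP g l phrase := hgoods phrase (by simp)
      have hgtail : ∀ ph ∈ stack, pvGoodP g l ph := fun ph hph => hgoods ph (by simp [hph])
      simp only [pvLoopB]
      cases hfind : pvFindNT g phrase 0 with
      | none =>
        have hterm : pvE l g phrase = [phrase] := by
          simp [pvE, pvExpandA, hfind]
        have hψ : pvPsi l g stack < f := by
          have hpow : 1 ≤ (pvC g) ^ (pvPhi l g phrase) :=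
            Nat.pow_pos (by unfold pvC; omega)
          have : pvPsi l g (phrase :: stack) = (pvC g) ^ (pvPhi l g phrase) + pvPsi l g stack := by
            simp [pvPsi]
          omega
        rw [ih stack (results ++ [phrase]) hgtail hψ]
        simp [hterm]
      | some is =>
        obtain ⟨i, s⟩ := is
        cases hlk : pvLookup g s with
        | none =>
          rcases pvFindNT_some g phrase 0 i s hfind with ⟨_, _, _, hsome⟩
          rw [hlk] at hsome; simp at hsome
        | some ps =>
          have hsl : s ∈ l.map Prod.fst := pvNT_key g l phrase i s hgood hfind
          rcases pvStepFacts g root l hord s ps hsl hlk with ⟨hrs, hfacts⟩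
          simp only [hlk, Option.getD_some]
          set exps := ps.map (fun production => phrase.take i ++ production ++ phrase.drop (i + 1)) with hexps
          rw [pv_foldl_cons_eq, List.reverse_reverse]
          have hC : 1 ≤ pvC g := by unfold pvC; omega
          have hφdec : ∀ p ∈ ps, pvPhi l g (phrase.take i ++ p ++ phrase.drop (i + 1)) < pvPhi l g phrase :=
            fun p hp => pvPhi_dec l g phrase i s ps p hfind hlk hp
              (fun t ht => (hfacts p hp t ht).2) hrs
          have hgexps : ∀ ph ∈ exps, pvGoodP g l ph := by
            intro ph hph
            rcases List.mem_map.mp hph with ⟨p, hp, rfl⟩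
            exact pvGood_new g l phrase p i hgood (fun t ht => (hfacts p hp t ht).1)
          have hψe : pvPsi l g exps < (pvC g) ^ (pvPhi l g phrase) := by
            have hφpos : 1 ≤ pvPhi l g phrase := pvPhi_pos l g phrase i s hfind
            have hbound : ∀ x ∈ exps.map (fun ph => (pvC g) ^ (pvPhi l g ph)),
                x ≤ (pvC g) ^ (pvPhi l g phrase - 1) := by
              intro x hx
              rcases List.mem_map.mp hx with ⟨ph, hph, rfl⟩
              rcases List.mem_map.mp hph with ⟨p, hp, rfl⟩
              exact Nat.pow_le_pow_right hC (by have := hφdec p hp; omega)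
            have hsum : pvPsi l g exps ≤ exps.length * (pvC g) ^ (pvPhi l g phrase - 1) := by
              have := List.sum_le_card_nsmul _ _ hbound
              simpa [pvPsi, smul_eq_mul] using this
            have hlen : exps.length < pvC g := by
              rw [hexps, List.length_map]
              exact pvProdCount g s ps hlk
            have hpos : 0 < (pvC g) ^ (pvPhi l g phrase - 1) := Nat.pow_pos (by omega)
            calc pvPsi l g exps ≤ exps.length * (pvC g) ^ (pvPhi l g phrase - 1) := hsum
              _ < pvC g * (pvC g) ^ (pvPhi l g phrase - 1) :=
                  Nat.mul_lt_mul_of_lt_of_le hlen (le_refl _) hpos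
              _ = (pvC g) ^ (pvPhi l g phrase - 1 + 1) := by rw [pow_succ]; ring
              _ = (pvC g) ^ (pvPhi l g phrase) := by congr 1; omega
          have hψnew : pvPsi l g (exps ++ stack) < f := by
            have h1 : pvPsi l g (phrase :: stack) = (pvC g) ^ (pvPhi l g phrase) + pvPsi l g stack := by
              simp [pvPsi]
            rw [pvPsi_append]
            omega
          have hgnew : ∀ ph ∈ exps ++ stack, pvGoodP g l ph := by
            intro ph hph
            rcases List.mem_append.mp hph with h1 | h2
            · exact hgexps ph h1
            · exact hgtail ph h2
          rw [ih (exps ++ stack) results hgnew hψnew]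
          have hEphrase : pvE l g phrase = exps.flatMap (fun ph => pvE l g ph) := by
            simp only [pvE]
            conv_lhs => rw [show pvPhi l g phrase + 1 = (pvPhi l g phrase) + 1 from rfl]
            simp only [pvExpandA, hfind, hlk, Option.getD_some]
            rw [hexps, List.flatMap_def, List.flatMap_def, List.map_map]
            congr 1
            apply List.map_congr_left
            intro p hp
            have hd := hφdec p hp
            have hgd : pvGoodP g l (phrase.take i ++ p ++ phrase.drop (i + 1)) :=
              pvGood_new g l phrase p i hgood (fun t ht => (hfacts p hp t ht).1)
            exact pvExpandA_fuel g root l hord (pvPhi l g phrase)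
              (phrase.take i ++ p ++ phrase.drop (i + 1))
              (pvPhi l g (phrase.take i ++ p ++ phrase.drop (i + 1)) + 1) hgd
              (by omega) (by omega)
          simp [hEphrase]

-- ===== VERDICT (by name: the statement is the Claim_ definition above) =====
theorem all_phrases_spec : Claim_equal_all_phrases := by
  intro g root _hdom hpre
  obtain ⟨l, hlmem, hord⟩ := hpre
  have hlen : l.length ≤ g.length := by
    rcases List.mem_flatMap.mp hlmem with ⟨a, ha, hla⟩
    have h1 : l.length = a.length := pvPerms_length a l hla
    have h2 : a.length ≤ g.length := (List.mem_sublists.mp ha).length_le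
    omega
  have hgroot : pvGoodP g l [root] := by
    intro t ht
    have : t = root := by simpa using ht
    subst this
    cases hlk : pvLookup g t with
    | none => exact Or.inl hlk
    | some ps => exact Or.inr (hord.2.2 (by simp [hlk]))
  unfold Spec_all_phrases all_phrases all_phrases_alt
  have hB : 1 ≤ pvB g := by unfold pvB; omega
  have hC : 1 ≤ pvC g := by unfold pvC; omega
  have hφroot : pvPhi l g [root] ≤ (pvB g) ^ g.length := by
    have h1 : pvPhi l g [root] = (pvB g) ^ (pvRank l root) := by simp [pvPhi]
    rw [h1]
    exact Nat.pow_le_pow_right hB (by unfold pvRank; omega)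
  have hψ : pvPsi l g [[root]] < (pvC g) ^ ((pvB g) ^ g.length) + 1 := by
    have h1 : pvPsi l g [[root]] = (pvC g) ^ (pvPhi l g [root]) := by simp [pvPsi]
    rw [h1]
    exact Nat.lt_succ_of_le (Nat.pow_le_pow_right hC hφroot)
  rw [pvLoopB_spec g root l hord _ [[root]] [] (by
      intro ph hph
      have hpe : ph = [root] := by simpa using hph
      rw [hpe]; exact hgroot) hψ]
  have e1 : pvExpandA g ((pvB g) ^ g.length + 1) [root] = pvE l g [root] :=
    pvExpandA_fuel g root l hord _ [root] _ hgroot (by omega) (by omega)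
  simp [e1, pvE]
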